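-- pv_equiv track=rewrite | github.com/rschaeff/pyECOD | ecod/utils/range_utils.py | positions_to_range
-- ===== SOURCE A (Python) =====
-- from typing import List, Tuple, Set, Optional
--
-- def positions_to_range(positions: Set[int]) -> str:
--     """Convert set of positions to range string"""
--     if not positions:
--         return ""
--
--     # Sort positions
--     sorted_positions = sorted(positions)
--
--     # Convert to range segments
--     segments = []
--     seg_start = sorted_positions[0]
--     seg_end = seg_start
--
--     for pos in sorted_positions[1:]:
--         if pos == seg_end + 1:
--             # Continue segment
--             seg_end = pos
--         else:
--             # End segment and start new one
--             segments.append(f"{seg_start}-{seg_end}")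
--             seg_start = pos
--             seg_end = pos
--
--     # Add final segment
--     segments.append(f"{seg_start}-{seg_end}")
--
--     return ",".join(segments)
-- ===== SOURCE B (Python) =====
-- def positions_to_range(positions):
--     """Convert set of positions to range string"""
--     s = sorted(positions)
--     if not s:
--         return ""
--     # break points: adjacent pairs that are not consecutive
--     breaks = [(a, b) for a, b in zip(s, s[1:]) if b != a + 1]
--     starts = [s[0]] + [b for _, b in breaks]
--     ends = [a for a, _ in breaks] + [s[-1]]
--     return ",".join(f"{x}-{y}" for x, y in zip(starts, ends))
-- ===== Notes on version B (the rewrite author's own statement) =====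
-- stated objective: alternative
-- what changed: Replaces the seg_start/seg_end state machine with a data-parallel decomposition: zip adjacent sorted pairs to find break points, derive the start and end lists from them, and zip those into formatted segments.
import Mathlib
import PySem

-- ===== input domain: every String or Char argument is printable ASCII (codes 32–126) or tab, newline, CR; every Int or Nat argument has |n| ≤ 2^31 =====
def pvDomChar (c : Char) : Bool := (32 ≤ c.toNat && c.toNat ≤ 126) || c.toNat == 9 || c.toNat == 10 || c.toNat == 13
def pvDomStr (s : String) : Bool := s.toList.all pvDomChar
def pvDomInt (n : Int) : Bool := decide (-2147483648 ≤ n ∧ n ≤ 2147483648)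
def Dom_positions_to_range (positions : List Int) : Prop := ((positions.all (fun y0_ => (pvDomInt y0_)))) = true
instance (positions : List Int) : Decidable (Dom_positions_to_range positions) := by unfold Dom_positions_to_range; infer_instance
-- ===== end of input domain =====

-- ===== PORT A =====
-- Header: B replaces A's seg_start/seg_end state machine by a break-point
-- decomposition over adjacent sorted pairs (alternative, same cost).

-- state = (segments, seg_start, seg_end); one step of A's for-loop
def pvAStep (st : List String × Int × Int) (p : Int) : List String × Int × Int :=
  if p = st.2.2 + 1 then (st.1, st.2.1, p)
  else (st.1 ++ [PySem.Int.toStr st.2.1 ++ "-" ++ PySem.Int.toStr st.2.2], p, p)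

def positions_to_range (positions : List Int) : String :=
  if positions = [] then ""
  else
    match PySem.List.sorted positions (fun x => x) false with
    | [] => ""  -- unreachable: sorted of a nonempty list is nonempty
    | x :: rest =>
      let r := rest.foldl pvAStep ([], x, x)
      PySem.Str.join "," (r.1 ++ [PySem.Int.toStr r.2.1 ++ "-" ++ PySem.Int.toStr r.2.2])

-- ===== PORT B =====
def positions_to_range_alt (positions : List Int) : String :=
  let s := PySem.List.sorted positions (fun x => x) false
  if s = [] then ""
  else
    -- zip(s, s[1:]) filtered to non-consecutive pairs (s[1:] = drop 1)
    let breaks := (s.zip (s.drop 1)).filter (fun p => p.2 != p.1 + 1)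
    let starts := s.headD 0 :: breaks.map (·.2)          -- [s[0]] + …  (guarded nonempty)
    let ends := breaks.map (·.1) ++ [s.getLastD 0]       -- … + [s[-1]] (guarded nonempty)
    PySem.Str.join "," ((starts.zip ends).map (fun p => PySem.Int.toStr p.1 ++ "-" ++ PySem.Int.toStr p.2))

-- ===== PRECONDITION & SPEC =====
def Spec_positions_to_range (positions : List Int) (out : String) : Prop := out = positions_to_range_alt positions
instance (positions : List Int) (out : String) : Decidable (Spec_positions_to_range positions out) := by unfold Spec_positions_to_range; infer_instance

-- ===== CLAIM (what is proved, stated in full; the proofs are below) =====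
def Claim_equal_positions_to_range : Prop := ∀ (positions : List Int), Dom_positions_to_range positions → Spec_positions_to_range positions (positions_to_range positions)

-- ===== LEMMAS AND PROOFS =====

def pvFmt (a b : Int) : String := PySem.Int.toStr a ++ "-" ++ PySem.Int.toStr b

-- canonical segment list of a (sorted) list with pending segment [st, en]
def pvRuns (st en : Int) : List Int → List String
  | [] => [pvFmt st en]
  | p :: ps => if p = en + 1 then pvRuns st p ps else pvFmt st en :: pvRuns p p ps

theorem pvA_runs (ps : List Int) : ∀ (segs : List String) (st en : Int),
    (let r := ps.foldl pvAStep (segs, st, en)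
     r.1 ++ [pvFmt r.2.1 r.2.2]) = segs ++ pvRuns st en ps := by
  induction ps with
  | nil => intro segs st en; simp [pvRuns]
  | cons p ps ih =>
    intro segs st en
    by_cases h : p = en + 1
    · simpa [pvAStep, h, pvRuns] using ih segs st p
    · have hstep := ih (segs ++ [pvFmt st en]) p p
      simp only [pvFmt] at hstep
      simp [pvAStep, h, pvRuns, pvFmt, hstep]

theorem pvB_runs (r : List Int) : ∀ (st x : Int),
    (((st :: (((x :: r).zip r).filter (fun p => p.2 != p.1 + 1)).map (·.2)).zip
        ((((x :: r).zip r).filter (fun p => p.2 != p.1 + 1)).map (·.1) ++ [(x :: r).getLastD 0])).map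
      (fun p => PySem.Int.toStr p.1 ++ "-" ++ PySem.Int.toStr p.2)) = pvRuns st x r := by
  induction r with
  | nil => intro st x; simp [pvRuns, pvFmt]
  | cons y t ih =>
    intro st x
    by_cases h : y = x + 1
    · simpa [pvRuns, h, List.getLastD] using ih st y
    · simpa [pvRuns, h, pvFmt, List.getLastD] using ih y y

theorem pv_main (positions : List Int) :
    positions_to_range positions = positions_to_range_alt positions := by
  unfold positions_to_range positions_to_range_alt
  by_cases hnil : positions = []
  · subst hnil
    have h0 : (PySem.List.sorted ([] : List Int) (fun x => x) false) = [] :=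
      List.eq_nil_of_length_eq_zero (PySem.List.length_sorted [] _ false)
    simp [h0]
  · simp only [if_neg hnil]
    have hlen : (PySem.List.sorted positions (fun x => x) false).length = positions.length :=
      PySem.List.length_sorted positions _ false
    cases hs : PySem.List.sorted positions (fun x => x) false with
    | nil =>
      exfalso
      rw [hs] at hlen
      exact hnil (List.eq_nil_of_length_eq_zero hlen.symm)
    | cons x rest =>
      have hne : (x :: rest : List Int) ≠ [] := by simp
      simp only [if_neg hne]
      have hA := pvA_runs rest ([] : List String) x x
      simp only [List.nil_append] at hA
      rw [show (x :: rest).drop 1 = rest from rfl, show (x :: rest).headD 0 = x from rfl]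
      rw [pvB_runs rest x x]
      simp only [pvFmt] at hA
      rw [hA]

-- ===== VERDICT (by name: the statement is the Claim_ definition above) =====
theorem positions_to_range_spec : Claim_equal_positions_to_range := by
  intro positions _
  unfold Spec_positions_to_range
  exact pv_main positions
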